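-- pv_equiv track=rewrite | github.com/Louellarex/TugasBesar1-Rafli-Maulana-Putra | TB 1 Rafli Maulana Putra.py | decode_message_from_matrix
-- ===== SOURCE A (Python) =====
-- def decode_message_from_matrix(matrix, num_cols):
--     decoded_message = ""
--     for col in range(num_cols):
--         for row in range(len(matrix)):
--             try:
--                 decoded_message += matrix[row][col]
--             except IndexError:
--                 decoded_message += ' '
--     return decoded_message
-- ===== SOURCE B (Python) =====
-- def decode_message_from_matrix(matrix, num_cols):
--     padded = [[row[c] if c < len(row) else ' ' for c in range(num_cols)] for row in matrix]
--     return ''.join(ch for col in zip(*padded) for ch in col)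
-- ===== Notes on version B (the rewrite author's own statement) =====
-- stated objective: simpler
-- what changed: Replaces the exception-guarded nested col/row character loop with materializing a rectangular padded grid and reading it column-by-column via zip-transpose.
import Mathlib
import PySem

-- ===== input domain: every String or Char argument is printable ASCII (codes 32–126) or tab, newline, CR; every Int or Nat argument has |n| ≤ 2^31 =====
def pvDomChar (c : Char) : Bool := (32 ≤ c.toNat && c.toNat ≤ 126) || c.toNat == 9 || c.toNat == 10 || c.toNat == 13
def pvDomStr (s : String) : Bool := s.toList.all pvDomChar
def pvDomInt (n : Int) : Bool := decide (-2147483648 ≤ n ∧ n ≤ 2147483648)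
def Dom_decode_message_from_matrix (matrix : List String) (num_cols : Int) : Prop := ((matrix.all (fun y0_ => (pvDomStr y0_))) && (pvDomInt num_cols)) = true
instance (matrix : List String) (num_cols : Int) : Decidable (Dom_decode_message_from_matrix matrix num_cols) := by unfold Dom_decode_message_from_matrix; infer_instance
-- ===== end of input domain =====

-- B reads a materialized padded rectangular grid column-by-column via a zip-style transpose,
-- instead of A's exception-guarded nested col/row loop; equal return value on all inputs (A is total).

-- ===== PORT A =====
-- the try/except body of A's inner loop: matrix[row][col], ' ' on IndexError
def pvCharA (matrix : List String) (row col : Int) : Char :=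
  match PySem.List.pyGet? matrix row with
  | some s =>
    match PySem.Str.pyGet? s col with
    | some ch => ch
    | none => ' '
  | none => ' '

def decode_message_from_matrix (matrix : List String) (num_cols : Int) : String :=
  String.mk <|
    (PySem.List.pyRange 0 num_cols 1).foldl (fun acc col =>
      (PySem.List.pyRange 0 (matrix.length : Int) 1).foldl (fun acc2 row =>
        acc2 ++ [pvCharA matrix row col]) acc) []

-- ===== PORT B =====
-- one cell of the padded grid: row[c] if c < len(row) else ' '
def pvPadChar (row : String) (c : Int) : Char :=
  if c < (row.toList.length : Int) then row.toList.getD c.toNat ' ' else ' '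

-- zip(*rows): fuel-based transcription of builtin zip; fuel = first row's length (an upper bound
-- here, since the grid is rectangular); stops exactly when some row is exhausted, as zip does
def pvZipTF : Nat → List (List Char) → List (List Char)
  | 0, _ => []
  | n + 1, rows =>
    if rows.all (fun r => !r.isEmpty) then
      (rows.map (fun r => r.headD ' ')) :: pvZipTF n (rows.map List.tail)
    else []

def pvZipT (rows : List (List Char)) : List (List Char) :=
  match rows with
  | [] => []
  | r :: _ => pvZipTF r.length rows

def decode_message_from_matrix_alt (matrix : List String) (num_cols : Int) : String :=
  let padded := matrix.map (fun row => (PySem.List.pyRange 0 num_cols 1).map (pvPadChar row))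
  String.mk (pvZipT padded).flatten

-- ===== PRECONDITION & SPEC =====
def Spec_decode_message_from_matrix (matrix : List String) (num_cols : Int) (out : String) : Prop := out = decode_message_from_matrix_alt matrix num_cols
instance (matrix : List String) (num_cols : Int) (out : String) : Decidable (Spec_decode_message_from_matrix matrix num_cols out) := by unfold Spec_decode_message_from_matrix; infer_instance

-- ===== CLAIM (what is proved, stated in full; the proofs are below) =====
def Claim_equal_decode_message_from_matrix : Prop := ∀ (matrix : List String) (num_cols : Int), Dom_decode_message_from_matrix matrix num_cols → Spec_decode_message_from_matrix matrix num_cols (decode_message_from_matrix matrix num_cols)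

-- ===== LEMMAS AND PROOFS =====

-- one cell: A's guarded lookup equals B's padded cell (for the nonnegative col indices range produces)
lemma charA_eq (matrix : List String) (i : Nat) (hi : i < matrix.length) (col : Int) (hc : 0 ≤ col) :
    pvCharA matrix (i : Int) col = pvPadChar matrix[i] col := by
  unfold pvCharA pvPadChar
  rw [PySem.List.pyGet?_natCast]
  simp only [List.getElem?_eq_getElem hi]
  have hs : PySem.Str.pyGet? matrix[i] col = matrix[i].toList[col.toNat]? := by
    simp [PySem.Str.pyGet?, PySem.List.pyGet?_of_nonneg _ hc]
  rw [hs]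
  by_cases h : col < (matrix[i].toList.length : Int)
  · have hk : col.toNat < matrix[i].toList.length := by omega
    rw [if_pos h, List.getElem?_eq_getElem hk]
    simp [List.getD_eq_getElem?_getD, List.getElem?_eq_getElem hk]
  · have hk : matrix[i].toList.length ≤ col.toNat := by omega
    rw [if_neg h, List.getElem?_eq_none_iff.mpr hk]

-- A's column (the inner row loop, as a map) equals B's padded grid read at column col
lemma innerA_eq (matrix : List String) (col : Int) (hc : 0 ≤ col) :
    (PySem.List.pyRange 0 (matrix.length : Int) 1).map (fun row => pvCharA matrix row col)
      = matrix.map (fun r => pvPadChar r col) := by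
  rw [PySem.List.pyRange_zero_natCast, List.map_map]
  refine List.ext_getElem (by simp) ?_
  intro i h1 h2
  simp only [List.getElem_map, List.getElem_range, Function.comp]
  exact charA_eq matrix i (by simpa using h1) col hc

-- transposing a rectangular map-of-maps grid yields the column maps
lemma zipTF_map_map (g : String → Int → Char) (cs : List Int) (l : List String) :
    pvZipTF cs.length (l.map (fun r => cs.map (g r)))
      = cs.map (fun c => l.map (fun r => g r c)) := by
  induction cs generalizing l with
  | nil => simp [pvZipTF]
  | cons c cs ih =>
    simp only [List.map_cons, List.length_cons, pvZipTF]
    rw [if_pos (by simp [List.all_map])]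
    simp only [List.map_map, Function.comp_def, List.tail_cons, List.headD_cons]
    rw [ih l]

lemma A_eq_flatMap (matrix : List String) (num_cols : Int) :
    decode_message_from_matrix matrix num_cols
      = String.mk ((PySem.List.pyRange 0 num_cols 1).flatMap
          (fun c => matrix.map (fun r => pvPadChar r c))) := by
  unfold decode_message_from_matrix
  simp only [PySem.List.foldl_append_singleton_eq_map, PySem.List.foldl_append_eq_flatMap,
    List.nil_append]
  congr 1
  rw [List.flatMap_def, List.flatMap_def]
  refine congrArg List.flatten (List.map_congr_left ?_)
  intro col hcol
  exact innerA_eq matrix col (PySem.List.mem_pyRange_one.mp hcol).1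

lemma B_eq_flatMap (matrix : List String) (num_cols : Int) :
    decode_message_from_matrix_alt matrix num_cols
      = String.mk ((PySem.List.pyRange 0 num_cols 1).flatMap
          (fun c => matrix.map (fun r => pvPadChar r c))) := by
  cases matrix with
  | nil =>
    simp only [decode_message_from_matrix_alt, pvZipT, List.map_nil, List.flatten_nil]
    rw [show ((PySem.List.pyRange 0 num_cols 1).flatMap
          (fun _ => ([] : List Char))) = [] from by simp [List.flatMap_def]]
  | cons m ms =>
    unfold decode_message_from_matrix_alt pvZipT
    simp only [List.map_cons]
    rw [show ((PySem.List.pyRange 0 num_cols 1).map (pvPadChar m)).length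
          = (PySem.List.pyRange 0 num_cols 1).length from List.length_map ..]
    rw [show ((PySem.List.pyRange 0 num_cols 1).map (pvPadChar m)) :: ms.map
          (fun row => (PySem.List.pyRange 0 num_cols 1).map (pvPadChar row))
        = (m :: ms).map (fun row => (PySem.List.pyRange 0 num_cols 1).map
            (fun c => pvPadChar row c)) from by simp]
    rw [zipTF_map_map (fun r c => pvPadChar r c)]
    rw [List.flatMap_def]
    simp

-- ===== VERDICT (by name: the statement is the Claim_ definition above) =====
theorem decode_message_from_matrix_spec : Claim_equal_decode_message_from_matrix := by
  intro matrix num_cols _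
  unfold Spec_decode_message_from_matrix
  rw [A_eq_flatMap, B_eq_flatMap]
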